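-- pv_equiv track=rewrite | github.com/mmetsa/PythonProjects | kt5/exam.py | sum_elements_around_last_three
-- ===== SOURCE A (Python) =====
-- def sum_elements_around_last_three(nums: list) -> int:
--     """
--     Given a list of ints.
--
--     Find sum of elements before and after last 3 in the list.
--
--     If there is no 3 in the list or list is too short
--     or there is no element before or after last 3 return 0.
--
--     Note if 3 is last element in the list you must return
--     sum of elements before and after 3 which is before last.
--
--
--     sum_before_and_after_last_three([1, 3, 7]) -> 8
--     sum_before_and_after_last_three([1, 2, 3, 4, 6, 4, 3, 4, 5, 3, 4, 5, 6]) -> 9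
--     sum_before_and_after_last_three([1, 2, 3, 4, 6, 4, 3, 4, 5, 3, 3, 2, 3]) -> 5
--     sum_before_and_after_last_three([1, 2, 3]) -> 0
--
--     :param nums: given list of ints
--     :return: sum of elements before and after last 3
--     """
--     has_threes = False
--     for elem in nums:
--         if elem == 3:
--             has_threes = True
--     if not has_threes:
--         return 0
--     if len(nums) < 3 or (len(nums) == 3 and (nums[1] != 3)):
--         return 0
--     last_three = 0
--     for elem in range(len(nums)):
--         if nums[elem] == 3 and elem != len(nums) - 1:
--             last_three = elem
--     return nums[last_three - 1] + nums[last_three + 1]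
-- ===== SOURCE B (Python) =====
-- def sum_elements_around_last_three(nums: list) -> int:
--     result = 0
--     for a, b, c in zip(nums, nums[1:], nums[2:]):
--         if b == 3:
--             result = a + c
--     return result
-- ===== Notes on version B (the rewrite author's own statement) =====
-- stated objective: simpler
-- what changed: Replaces A's membership flag pass, explicit length/guard chain and index scan with index arithmetic by a single sliding-window pass over zipped triples (a,b,c) that records a+c at each window whose centre is 3; the guards disappear because a window exists only where both neighbours exist.
-- intended difference: On lists of length >= 4 whose only 3s are the first and/or last element and whose second and last elements do not sum to zero, A returns the sum of the last and second elements (a negative-index wraparound from its last_three=0 default) while B returns 0, the docstring's intended value when there is no element before or after the last 3 (when that sum is zero the two agree). — e.g. on sum_elements_around_last_three([1, 2, 4, 3]): A returns 5, B returns 0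
import Mathlib
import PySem

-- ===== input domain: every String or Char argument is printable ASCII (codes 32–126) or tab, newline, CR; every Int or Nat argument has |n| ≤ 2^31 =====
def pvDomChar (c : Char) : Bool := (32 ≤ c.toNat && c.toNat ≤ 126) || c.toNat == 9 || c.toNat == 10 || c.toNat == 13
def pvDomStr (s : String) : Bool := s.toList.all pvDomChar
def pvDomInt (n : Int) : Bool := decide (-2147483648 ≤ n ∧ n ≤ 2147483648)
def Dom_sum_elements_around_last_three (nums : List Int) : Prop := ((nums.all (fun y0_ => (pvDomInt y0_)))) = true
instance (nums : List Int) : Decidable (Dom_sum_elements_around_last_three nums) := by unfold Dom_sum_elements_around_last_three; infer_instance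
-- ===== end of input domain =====

-- B replaces A's flag pass + guard chain + index scan by one sliding-window pass over
-- zipped triples, with no guards or index arithmetic (objective: simpler); outside D_ they agree.

-- ===== PORT A =====
-- Under A's guards every index used is in range (last_three-1 may be -1, Python's
-- negative indexing), so the pyGetD defaults are never taken: exact on the domain.
def sum_elements_around_last_three (nums : List Int) : Int :=
  let has_threes := nums.foldl (fun b elem => if elem = 3 then true else b) false
  if ¬ has_threes then 0
  else if nums.length < 3 ∨ (nums.length = 3 ∧ PySem.List.pyGetD nums 1 0 ≠ 3) then 0
  else
    let last_three := (PySem.List.pyRange 0 nums.length 1).foldl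
      (fun lt elem =>
        if PySem.List.pyGetD nums elem 0 = 3 ∧ elem ≠ (nums.length : Int) - 1 then elem else lt) 0
    PySem.List.pyGetD nums (last_three - 1) 0 + PySem.List.pyGetD nums (last_three + 1) 0

-- ===== PORT B =====
-- Source B's 'for a, b, c in zip(nums, nums[1:], nums[2:])' : fold over the zipped triples
-- (nums[1:] = drop 1, nums[2:] = drop 2 — exact, slicing from a nonnegative literal).
def sum_elements_around_last_three_alt (nums : List Int) : Int :=
  (nums.zip ((nums.drop 1).zip (nums.drop 2))).foldl
    (fun result t => if t.2.1 = 3 then t.1 + t.2.2 else result) 0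

-- ===== PRECONDITION & SPEC =====
-- On lists of length >= 4 whose only 3s are the first and/or last element and whose second
-- and last elements do not sum to zero, A returns the sum of the last and second elements
-- (negative-index wraparound from its last_three = 0 default), while B returns 0, the
-- docstring's intended value when no element exists before or after the last 3 (when that
-- sum is zero the two agree).
def D_sum_elements_around_last_three (nums : List Int) : Prop :=
  4 ≤ nums.length ∧ 3 ∈ nums ∧ 3 ∉ (nums.drop 1).dropLast
    ∧ nums.getD 1 0 + nums.getD (nums.length - 1) 0 ≠ 0
instance (nums : List Int) : Decidable (D_sum_elements_around_last_three nums) := by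
  unfold D_sum_elements_around_last_three; infer_instance

def Spec_sum_elements_around_last_three (nums : List Int) (out : Int) : Prop :=
  ¬ D_sum_elements_around_last_three nums → out = sum_elements_around_last_three_alt nums
instance (nums : List Int) (out : Int) : Decidable (Spec_sum_elements_around_last_three nums out) := by
  unfold Spec_sum_elements_around_last_three; infer_instance

def pvDiffWitness_sum_elements_around_last_three : List Int := [1, 2, 4, 3]
def pvDiffWitnessOut_sum_elements_around_last_three : Int × Int := (5, 0)

-- ===== CLAIM (what is proved, stated in full; the proofs are below) =====
def Claim_unchanged_sum_elements_around_last_three : Prop := ∀ (nums : List Int), Dom_sum_elements_around_last_three nums → Spec_sum_elements_around_last_three nums (sum_elements_around_last_three nums)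
def Claim_exact_sum_elements_around_last_three : Prop := ∀ (nums : List Int), Dom_sum_elements_around_last_three nums → D_sum_elements_around_last_three nums → sum_elements_around_last_three nums ≠ sum_elements_around_last_three_alt nums
def Claim_changed_sum_elements_around_last_three : Prop := Dom_sum_elements_around_last_three (pvDiffWitness_sum_elements_around_last_three) ∧ D_sum_elements_around_last_three (pvDiffWitness_sum_elements_around_last_three) ∧ sum_elements_around_last_three (pvDiffWitness_sum_elements_around_last_three) = pvDiffWitnessOut_sum_elements_around_last_three.1 ∧ sum_elements_around_last_three_alt (pvDiffWitness_sum_elements_around_last_three) = pvDiffWitnessOut_sum_elements_around_last_three.2 ∧ pvDiffWitnessOut_sum_elements_around_last_three.1 ≠ pvDiffWitnessOut_sum_elements_around_last_three.2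

-- ===== LEMMAS AND PROOFS =====

-- A's flag loop computes membership of 3.
lemma flag_eq_contains (l : List Int) (b : Bool) :
    l.foldl (fun b elem => if elem = 3 then true else b) b = (b || l.contains 3) := by
  induction l generalizing b with
  | nil => simp
  | cons a l ih =>
      simp only [List.foldl_cons, List.contains_cons, ih]
      by_cases h : a = 3
      · simp [h]
      · have h3 : (3 == a) = false := by
          simp only [beq_eq_false_iff_ne]
          exact fun hh => h hh.symm
        simp [h, h3]

-- A's index scan, read from the right: last non-final index holding 3, default 0.
def altRevScan (nums : List Int) : Nat → Int
  | 0 => 0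
  | j + 1 => if PySem.List.pyGetD nums (j : Int) 0 = 3 then (j : Int) else altRevScan nums j

-- A's forward overwrite over range(m) computes altRevScan, as long as m-1 < nums.length - 1.
lemma fold_eq_rev (nums : List Int) (m : Nat) (hm : m < nums.length) :
    (PySem.List.pyRange 0 (m : Int) 1).foldl
      (fun lt elem =>
        if PySem.List.pyGetD nums elem 0 = 3 ∧ elem ≠ (nums.length : Int) - 1 then elem else lt) 0
    = altRevScan nums m := by
  induction m with
  | zero => simp [altRevScan]
  | succ k ih =>
      have hk : k < nums.length := Nat.lt_of_succ_lt hm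
      have hsplit : PySem.List.pyRange 0 ((k : Int) + 1) 1
          = PySem.List.pyRange 0 (k : Int) 1 ++ [(k : Int)] :=
        PySem.List.pyRange_one_succ_right (by positivity)
      have hne : (k : Int) ≠ (nums.length : Int) - 1 := by
        have : (k : Int) + 1 < (nums.length : Int) := by exact_mod_cast hm
        omega
      rw [show ((Nat.succ k : Nat) : Int) = (k : Int) + 1 by push_cast; ring, hsplit,
        List.foldl_append, ih hk]
      simp only [List.foldl_cons, List.foldl_nil, altRevScan]
      by_cases h : PySem.List.pyGetD nums (k : Int) 0 = 3 <;> simp [h, hne]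

-- B's window pass, read from the right: value at the last window whose centre is 3, default 0.
def bRev (nums : List Int) : Nat → Int
  | 0 => 0
  | m + 1 => if nums.getD (m + 1) 0 = 3 then nums.getD m 0 + nums.getD (m + 2) 0
             else bRev nums m

-- The zipped triple list is the window list indexed by range.
lemma zip_eq_map (nums : List Int) :
    nums.zip ((nums.drop 1).zip (nums.drop 2))
      = (List.range (nums.length - 2)).map
          (fun i => (nums.getD i 0, (nums.getD (i + 1) 0, nums.getD (i + 2) 0))) := by
  apply List.ext_getElem
  · simp [List.length_zip]; omega
  · intro i h1 h2
    have hi : i < nums.length - 2 := by simpa using h2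
    have h0 : i < nums.length := by omega
    have ha : 1 + i < nums.length := by omega
    have hb : 2 + i < nums.length := by omega
    simp [List.getElem_zip, List.getElem_drop, h0,
      Nat.add_comm 2 i,
      List.getElem?_eq_getElem (show i + 1 < nums.length by omega),
      List.getElem?_eq_getElem (show i + 2 < nums.length by omega)]

-- B's forward fold over the windows computes bRev.
lemma bfold_eq_bRev (nums : List Int) (m : Nat) :
    (List.range m).foldl
      (fun r i => if nums.getD (i + 1) 0 = 3 then nums.getD i 0 + nums.getD (i + 2) 0 else r) 0
    = bRev nums m := by
  induction m with
  | zero => simp [bRev]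
  | succ k ih =>
      rw [List.range_succ, List.foldl_append, ih]
      simp only [List.foldl_cons, List.foldl_nil, bRev]

-- If no window centre in 1..m holds 3, bRev is 0.
lemma bRev_eq_zero (nums : List Int) (m : Nat)
    (h : ∀ j : Nat, 1 ≤ j → j ≤ m → nums.getD j 0 ≠ 3) : bRev nums m = 0 := by
  induction m with
  | zero => rfl
  | succ k ih =>
      simp only [bRev]
      rw [if_neg (h (k + 1) (by omega) (by omega))]
      exact ih (fun j h1 h2 => h j h1 (by omega))

-- If some centre in 1..k holds 3, bRev computes A's neighbour sum at altRevScan (k+1).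
lemma bRev_eq_A (nums : List Int) (k : Nat)
    (h : ∃ j : Nat, 1 ≤ j ∧ j ≤ k ∧ nums.getD j 0 = 3) :
    bRev nums k
      = PySem.List.pyGetD nums (altRevScan nums (k + 1) - 1) 0
        + PySem.List.pyGetD nums (altRevScan nums (k + 1) + 1) 0 := by
  induction k with
  | zero => obtain ⟨j, h1, h2, _⟩ := h; omega
  | succ k ih =>
      simp only [bRev, altRevScan]
      by_cases hhit : nums.getD (k + 1) 0 = 3
      · have hpg : PySem.List.pyGetD nums ((k + 1 : Nat) : Int) 0 = 3 := by
          rw [PySem.List.pyGetD_natCast]; exact hhit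
        rw [if_pos hhit, if_pos hpg,
          show ((k + 1 : Nat) : Int) - 1 = ((k : Nat) : Int) by push_cast; ring,
          show ((k + 1 : Nat) : Int) + 1 = ((k + 2 : Nat) : Int) by push_cast; ring,
          PySem.List.pyGetD_natCast, PySem.List.pyGetD_natCast]
      · have hpg : ¬ PySem.List.pyGetD nums ((k + 1 : Nat) : Int) 0 = 3 := by
          rw [PySem.List.pyGetD_natCast]; exact hhit
        rw [if_neg hhit, if_neg hpg]
        apply ih
        obtain ⟨j, h1, h2, h3⟩ := h
        refine ⟨j, h1, ?_, h3⟩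
        rcases Nat.lt_or_ge j (k + 1) with hj | hj
        · omega
        · exact absurd (by rwa [show j = k + 1 by omega] at h3) hhit

-- B in its bRev form.
lemma alt_eq_bRev (nums : List Int) :
    sum_elements_around_last_three_alt nums = bRev nums (nums.length - 2) := by
  unfold sum_elements_around_last_three_alt
  rw [zip_eq_map, List.foldl_map, bfold_eq_bRev]

-- A 3 somewhere in the middle, extracted from membership of nums[1:-1].
lemma mid_mem (nums : List Int) (h : 3 ∈ (nums.drop 1).dropLast) :
    ∃ j : Nat, 1 ≤ j ∧ j ≤ nums.length - 2 ∧ nums.getD j 0 = 3 := by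
  obtain ⟨i, hi, hget⟩ := List.mem_iff_getElem.mp h
  have hlen : (nums.drop 1).dropLast.length = nums.length - 2 := by
    simp; omega
  have hi' : i < nums.length - 2 := by rwa [hlen] at hi
  refine ⟨i + 1, by omega, by omega, ?_⟩
  have h0 : 1 + i < nums.length := by omega
  rw [List.getElem_dropLast, List.getElem_drop] at hget
  rw [List.getD_eq_getElem nums 0 (by omega : i + 1 < nums.length)]
  convert hget using 2
  omega

-- A 3 at an interior index is a member of nums[1:-1].
lemma mem_of_mid (nums : List Int) (j : Nat) (hj1 : 1 ≤ j) (hj2 : j ≤ nums.length - 2)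
    (h : nums.getD j 0 = 3) : 3 ∈ (nums.drop 1).dropLast := by
  have hjlen : j < nums.length := by omega
  refine List.mem_iff_getElem.mpr ⟨j - 1, by simp; omega, ?_⟩
  rw [List.getElem_dropLast, List.getElem_drop]
  rw [List.getD_eq_getElem nums 0 hjlen] at h
  convert h using 2
  omega

-- With no interior 3, A's scan returns its 0 default.
lemma altRevScan_eq_zero (nums : List Int) (k : Nat)
    (hno : ∀ j : Nat, 1 ≤ j → j ≤ k → nums.getD j 0 ≠ 3) : altRevScan nums (k + 1) = 0 := by
  induction k with
  | zero => simp [altRevScan]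
  | succ k ih =>
      have : ¬ PySem.List.pyGetD nums ((k + 1 : Nat) : Int) 0 = 3 := by
        rw [PySem.List.pyGetD_natCast]
        exact hno (k + 1) (by omega) (by omega)
      simp only [altRevScan]
      rw [if_neg (by exact_mod_cast this)]
      exact ih (fun j h1 h2 => hno j h1 (by omega))

-- A's index scan over range(len), in altRevScan form (the final index never hits).
lemma scan_fold_eq (nums : List Int) (hlen3 : 3 ≤ nums.length) :
    (PySem.List.pyRange 0 (nums.length : Int) 1).foldl
      (fun lt elem =>
        if PySem.List.pyGetD nums elem 0 = 3 ∧ elem ≠ (nums.length : Int) - 1 then elem else lt) 0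
    = altRevScan nums ((nums.length - 2) + 1) := by
  have hm : nums.length - 1 < nums.length := by omega
  have hcast : ((nums.length - 1 : Nat) : Int) = (nums.length : Int) - 1 :=
    Nat.cast_sub (by omega)
  have hsplit : PySem.List.pyRange 0 (nums.length : Int) 1
      = PySem.List.pyRange 0 (((nums.length - 1 : Nat)) : Int) 1 ++ [((nums.length - 1 : Nat) : Int)] := by
    rw [hcast]
    conv_lhs => rw [show (nums.length : Int) = ((nums.length : Int) - 1) + 1 by ring]
    exact PySem.List.pyRange_one_succ_right (by omega)
  rw [hsplit, List.foldl_append, fold_eq_rev nums (nums.length - 1) hm]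
  simp only [List.foldl_cons, List.foldl_nil]
  rw [if_neg (by simp [hcast])]
  rw [show nums.length - 1 = (nums.length - 2) + 1 by omega]

-- With no interior 3, A's scan defaults to 0 and the neighbour sum wraps to nums[-1] + nums[1].
lemma scanval_noMid (nums : List Int) (h4 : 4 ≤ nums.length)
    (hno : ∀ j : Nat, 1 ≤ j → j ≤ nums.length - 2 → nums.getD j 0 ≠ 3) :
    PySem.List.pyGetD nums (altRevScan nums ((nums.length - 2) + 1) - 1) 0
      + PySem.List.pyGetD nums (altRevScan nums ((nums.length - 2) + 1) + 1) 0
    = nums.getD (nums.length - 1) 0 + nums.getD 1 0 := by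
  have hne : nums ≠ [] := by intro h; rw [h] at h4; simp at h4
  rw [altRevScan_eq_zero nums (nums.length - 2) hno,
    show (0 : Int) - 1 = -1 by ring, show (0 : Int) + 1 = ((1 : Nat) : Int) by norm_num,
    PySem.List.pyGetD_neg_one nums 0 hne, PySem.List.pyGetD_natCast,
    List.getLast_eq_getElem, List.getD_eq_getElem nums 0
      (show nums.length - 1 < nums.length by omega)]

-- With no interior 3, B's fold never fires.
lemma B_noMid (nums : List Int)
    (hno : ∀ j : Nat, 1 ≤ j → j ≤ nums.length - 2 → nums.getD j 0 ≠ 3) :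
    sum_elements_around_last_three_alt nums = 0 := by
  rw [alt_eq_bRev]
  exact bRev_eq_zero nums _ hno

-- With 3 present but no interior 3, A wraps around: nums[-1] + nums[1].
lemma A_noMid (nums : List Int) (h1 : 3 ∈ nums) (h4 : 4 ≤ nums.length)
    (hno : ∀ j : Nat, 1 ≤ j → j ≤ nums.length - 2 → nums.getD j 0 ≠ 3) :
    sum_elements_around_last_three nums
      = nums.getD (nums.length - 1) 0 + nums.getD 1 0 := by
  unfold sum_elements_around_last_three
  rw [flag_eq_contains]
  simp only [Bool.false_or, List.contains_eq_mem, decide_eq_true_eq]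
  rw [if_neg (not_not_intro h1), if_neg (by intro hc; rcases hc with h | ⟨h, _⟩ <;> omega),
    scan_fold_eq nums (by omega)]
  exact scanval_noMid nums h4 hno

-- ===== VERDICT (by name: the statements are the Claim_ definitions above) =====
theorem sum_elements_around_last_three_spec : Claim_unchanged_sum_elements_around_last_three := by
  intro nums _ hD
  unfold sum_elements_around_last_three
  rw [flag_eq_contains]
  simp only [Bool.false_or, List.contains_eq_mem, decide_eq_true_eq]
  rw [alt_eq_bRev]
  split_ifs with h1 hg
  · -- guard fires: len < 3, or len = 3 with nums[1] != 3
    rcases hg with hlen | ⟨hlen, hne⟩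
    · rw [show nums.length - 2 = 0 by omega]; rfl
    · have hne' : nums.getD 1 0 ≠ 3 := by
        rw [show (1 : Int) = ((1 : Nat) : Int) by norm_num, PySem.List.pyGetD_natCast] at hne
        exact hne
      rw [show nums.length - 2 = 1 by omega]
      simp only [bRev]
      rw [if_neg hne']
  · -- guards pass
    have hlen3 : 3 ≤ nums.length := by
      rcases Nat.lt_or_ge nums.length 3 with h | h
      · exact absurd (Or.inl h) hg
      · exact h
    rw [scan_fold_eq nums hlen3]
    by_cases hmid : ∃ j : Nat, 1 ≤ j ∧ j ≤ nums.length - 2 ∧ nums.getD j 0 = 3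
    · -- a 3 strictly inside: both compute its neighbour sum
      exact (bRev_eq_A nums (nums.length - 2) hmid).symm
    · -- no interior 3: A wraps to nums[-1] + nums[1], which ¬D_ forces to be 0 = B
      have hno : ∀ j : Nat, 1 ≤ j → j ≤ nums.length - 2 → nums.getD j 0 ≠ 3 := by
        intro j hj1 hj2 hj3
        exact hmid ⟨j, hj1, hj2, hj3⟩
      have h4 : 4 ≤ nums.length := by
        rcases Nat.lt_or_ge nums.length 4 with hl | hl
        · have hlen : nums.length = 3 := by omega
          have h13 : PySem.List.pyGetD nums 1 0 = 3 := by
            by_contra hc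
            exact hg (Or.inr ⟨hlen, hc⟩)
          rw [show (1 : Int) = ((1 : Nat) : Int) by norm_num, PySem.List.pyGetD_natCast] at h13
          exact absurd (hno 1 (le_refl 1) (by omega) h13) (by simp)
        · exact hl
      have hnm : 3 ∉ (nums.drop 1).dropLast := by
        intro hmem
        obtain ⟨j, hj1, hj2, hj3⟩ := mid_mem nums hmem
        exact hno j hj1 hj2 hj3
      have hsum : nums.getD 1 0 + nums.getD (nums.length - 1) 0 = 0 := by
        by_contra hc
        exact hD ⟨h4, h1, hnm, hc⟩
      rw [scanval_noMid nums h4 hno, bRev_eq_zero nums _ hno]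
      omega
  · -- no 3 at all: B's fold never fires
    refine (bRev_eq_zero nums _ (fun j hj1 hj2 heq => h1 ?_)).symm
    have hjlen : j < nums.length := by omega
    rw [List.getD_eq_getElem nums 0 hjlen] at heq
    exact heq ▸ List.getElem_mem hjlen

theorem sum_elements_around_last_three_changed : Claim_changed_sum_elements_around_last_three := by
  unfold Claim_changed_sum_elements_around_last_three; decide

theorem sum_elements_around_last_three_tight : Claim_exact_sum_elements_around_last_three := by
  intro nums _ hd
  obtain ⟨h4, h1, hnm, hsum⟩ := hd
  have hno : ∀ j : Nat, 1 ≤ j → j ≤ nums.length - 2 → nums.getD j 0 ≠ 3 := by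
    intro j hj1 hj2 hj3
    exact hnm (mem_of_mid nums j hj1 hj2 hj3)
  rw [A_noMid nums h1 h4 hno, B_noMid nums hno]
  omega
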